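-- pv_equiv track=rewrite | github.com/Varnook/8-bit_toy_pc-logisim- | microcoder.py | borrarComentarios
-- ===== SOURCE A (Python) =====
-- def borrarComentarios(texto):
--     resultado = ""
--     esComentario = False
--
--     for c in texto:
--         if c == ';' and not esComentario:
--             esComentario = True
--         elif c == '\n' and esComentario:
--             esComentario = False
--
--         if not esComentario and c not in ' \t':
--             resultado += c
--
--     return resultado
-- ===== SOURCE B (Python) =====
-- def borrarComentarios(texto):
--     lineas = []
--     for linea in texto.split('\n'):
--         codigo = []
--         for c in linea:
--             if c == ';':
--                 break
--             if c not in ' \t':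
--                 codigo.append(c)
--         lineas.append(''.join(codigo))
--     return '\n'.join(lineas)
-- ===== Notes on version B (the rewrite author's own statement) =====
-- stated objective: simpler
-- what changed: Replaces A's character-by-character scan carrying an in-comment flag by a per-line decomposition: split into lines, truncate each line at its first semicolon, remove spaces and tabs, and rejoin the lines with newlines.
import Mathlib
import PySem

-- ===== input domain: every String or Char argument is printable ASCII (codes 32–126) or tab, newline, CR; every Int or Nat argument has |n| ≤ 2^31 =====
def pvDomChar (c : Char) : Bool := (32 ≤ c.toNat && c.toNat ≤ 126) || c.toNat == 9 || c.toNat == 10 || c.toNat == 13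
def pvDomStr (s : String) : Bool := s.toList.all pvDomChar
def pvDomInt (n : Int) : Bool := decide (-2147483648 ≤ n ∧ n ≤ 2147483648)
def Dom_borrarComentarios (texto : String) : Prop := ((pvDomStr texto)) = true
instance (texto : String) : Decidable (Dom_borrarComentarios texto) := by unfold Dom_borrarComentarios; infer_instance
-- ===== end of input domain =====

-- B replaces the character scan with an in-comment flag by a per-line decomposition
-- (split on '\n', cut each line at its first ';', drop spaces/tabs, rejoin); objective: simpler.

-- ===== PORT A =====
-- one step of A's loop body: update the esComentario flag, then maybe append c
def pasoA (st : List Char × Bool) (c : Char) : List Char × Bool :=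
  let esC : Bool :=
    if c = ';' ∧ st.2 = false then true
    else if c = '\n' ∧ st.2 = true then false
    else st.2
  (if esC = false ∧ ¬(c = ' ' ∨ c = '\t') then st.1 ++ [c] else st.1, esC)

def borrarComentarios (texto : String) : String :=
  String.ofList (texto.toList.foldl pasoA ([], false)).1

-- ===== PORT B =====
-- B's inner loop: keep chars before the first ';', skipping spaces and tabs
def limpiarLinea : List Char → List Char
  | [] => []
  | c :: cs =>
    if c = ';' then []
    else if c = ' ' ∨ c = '\t' then limpiarLinea cs
    else c :: limpiarLinea cs

def borrarComentarios_alt (texto : String) : String :=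
  String.ofList (List.intercalate ['\n'] ((texto.toList.splitOn '\n').map limpiarLinea))

-- ===== PRECONDITION & SPEC =====
def Spec_borrarComentarios (texto : String) (out : String) : Prop := out = borrarComentarios_alt texto
instance (texto : String) (out : String) : Decidable (Spec_borrarComentarios texto out) := by unfold Spec_borrarComentarios; infer_instance

-- ===== CLAIM (what is proved, stated in full; the proofs are below) =====
def Claim_equal_borrarComentarios : Prop := ∀ (texto : String), Dom_borrarComentarios texto → Spec_borrarComentarios texto (borrarComentarios texto)

-- ===== LEMMAS AND PROOFS =====

-- A's loop as a structural recursion on the remaining characters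
def fA (esC : Bool) : List Char → List Char
  | [] => []
  | c :: cs =>
    if c = ';' ∧ esC = false then fA true cs
    else if c = '\n' ∧ esC = true then '\n' :: fA false cs
    else if esC = false ∧ ¬(c = ' ' ∨ c = '\t') then c :: fA esC cs
    else fA esC cs

lemma foldl_pasoA (cs : List Char) (acc : List Char) (esC : Bool) :
    (cs.foldl pasoA (acc, esC)).1 = acc ++ fA esC cs := by
  induction cs generalizing acc esC with
  | nil => simp [fA]
  | cons c cs ih =>
    by_cases hc : c = ';' <;> by_cases hn : c = '\n' <;>
      by_cases hs : c = ' ' ∨ c = '\t' <;> cases esC <;>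
        simp_all [pasoA, fA]

lemma intercalate_cons_head (sep x : List Char) (c : Char) (xs : List (List Char)) :
    List.intercalate sep ((c :: x) :: xs) = c :: List.intercalate sep (x :: xs) := by
  cases xs <;> simp [List.intercalate, List.intersperse]

lemma intercalate_cons_cons (sep x y : List Char) (zs : List (List Char)) :
    List.intercalate sep (x :: y :: zs) = x ++ sep ++ List.intercalate sep (y :: zs) := by
  simp [List.intercalate, List.intersperse]

lemma fA_eq_lines (cs : List Char) :
    fA false cs = List.intercalate ['\n'] ((cs.splitOnP (· == '\n')).map limpiarLinea)
    ∧ fA true cs = List.intercalate ['\n'] ([] :: ((cs.splitOnP (· == '\n')).tail.map limpiarLinea)) := by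
  induction cs with
  | nil => refine ⟨?_, ?_⟩ <;> simp [fA, limpiarLinea, List.splitOnP_nil, List.intercalate]
  | cons c cs ih =>
    obtain ⟨ih1, ih2⟩ := ih
    obtain ⟨h, t, hht⟩ : ∃ h t, cs.splitOnP (· == '\n') = h :: t := by
      cases hcs : cs.splitOnP (· == '\n') with
      | nil => exact absurd hcs (List.splitOnP_ne_nil _ _)
      | cons h t => exact ⟨h, t, rfl⟩
    by_cases hnl : c = '\n'
    · subst hnl
      have hsp : ('\n' :: cs).splitOnP (· == '\n') = [] :: cs.splitOnP (· == '\n') := by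
        simp [List.splitOnP_cons]
      constructor
      · rw [hsp, hht, List.map_cons, List.map_cons, intercalate_cons_cons]
        simp only [limpiarLinea, List.nil_append, List.singleton_append]
        rw [show fA false ('\n' :: cs) = '\n' :: fA false cs by simp [fA]]
        rw [ih1, hht, List.map_cons]
      · rw [hsp, hht, List.tail_cons, List.map_cons, intercalate_cons_cons]
        simp only [List.nil_append, List.singleton_append]
        rw [show fA true ('\n' :: cs) = '\n' :: fA false cs by simp [fA]]
        rw [ih1, hht, List.map_cons]
    · have hsp : (c :: cs).splitOnP (· == '\n') = (c :: h) :: t := by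
        simp [List.splitOnP_cons, hnl, hht]
      constructor
      · by_cases hsemi : c = ';'
        · subst hsemi
          rw [hsp, List.map_cons, show limpiarLinea (';' :: h) = [] by simp [limpiarLinea]]
          rw [show fA false (';' :: cs) = fA true cs by simp [fA]]
          rw [ih2, hht, List.tail_cons]
        · by_cases hsp2 : c = ' ' ∨ c = '\t'
          · rw [hsp, List.map_cons,
              show limpiarLinea (c :: h) = limpiarLinea h by simp [limpiarLinea, hsemi, hsp2]]
            have hcn : ¬ (c = ';' ∧ (false : Bool) = false) := by simp [hsemi]
            have hcn2 : ¬ (c = '\n' ∧ (false : Bool) = true) := by simp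
            rw [show fA false (c :: cs) = fA false cs by simp [fA, hsemi, hsp2]]
            rw [ih1, hht, List.map_cons]
          · rw [hsp, List.map_cons,
              show limpiarLinea (c :: h) = c :: limpiarLinea h by
                simp [limpiarLinea, hsemi, hsp2]]
            rw [intercalate_cons_head]
            rw [show fA false (c :: cs) = c :: fA false cs by simp [fA, hsemi, hnl, hsp2]]
            rw [ih1, hht, List.map_cons]
      · rw [hsp, List.tail_cons]
        rw [show fA true (c :: cs) = fA true cs by simp [fA, hnl]]
        rw [ih2, hht, List.tail_cons]

-- ===== VERDICT (by name: the statement is the Claim_ definition above) =====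
theorem borrarComentarios_spec : Claim_equal_borrarComentarios := by
  intro texto _
  unfold Spec_borrarComentarios borrarComentarios borrarComentarios_alt
  rw [foldl_pasoA]
  rw [List.nil_append, (fA_eq_lines texto.toList).1]
  simp [List.splitOn]
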